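-- pv_equiv track=rewrite | github.com/jasstej/tools | network-recon/scanner.py | fingerprint_os
-- ===== SOURCE A (Python) =====
-- def fingerprint_os(open_ports: list) -> str:
--     """
--     Derive a rough OS fingerprint hint from the open port pattern.
--     This is purely heuristic — not authoritative.
--     """
--     ports = {r["port"] for r in open_ports}
--
--     if {135, 139, 445}.intersection(ports):
--         return "Windows (SMB/MSRPC detected)"
--     if 22 in ports and not ports.intersection({135, 139, 445}):
--         if 80 in ports or 443 in ports:
--             return "Linux / Unix (SSH + web stack)"
--         return "Linux / Unix (SSH detected)"
--     if {2375}.intersection(ports):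
--         return "Linux with Docker daemon exposed"
--     if {9200}.intersection(ports):
--         return "Linux / Elasticsearch node"
--     if {3306, 5432, 27017}.intersection(ports):
--         return "Database server (Linux likely)"
--     if {3389}.intersection(ports):
--         return "Windows (RDP detected)"
--     if ports:
--         return "Unknown OS — insufficient port pattern"
--     return "No open ports — OS undetermined"
-- ===== SOURCE B (Python) =====
-- RANK = {135: 0, 139: 0, 445: 0, 22: 1, 2375: 2, 9200: 3,
--         3306: 4, 5432: 4, 27017: 4, 3389: 5}
--
-- MESSAGES = ["Windows (SMB/MSRPC detected)",
--             "",  # rank 1 (SSH) is refined separately below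
--             "Linux with Docker daemon exposed",
--             "Linux / Elasticsearch node",
--             "Database server (Linux likely)",
--             "Windows (RDP detected)",
--             "Unknown OS — insufficient port pattern",
--             "No open ports — OS undetermined"]
--
--
-- def fingerprint_os(open_ports: list) -> str:
--     """
--     Derive a rough OS fingerprint hint from the open port pattern.
--
--     Each port is classified independently with a priority rank (0 = strongest
--     signal); the verdict is the message of the best (lowest) rank seen, with
--     the SSH rank refined by whether a web port is also open.
--     """
--     ports = [r["port"] for r in open_ports]
--     best = min((RANK.get(p, 6) for p in ports), default=7)
--     if best == 1:
--         if any(p in (80, 443) for p in ports):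
--             return "Linux / Unix (SSH + web stack)"
--         return "Linux / Unix (SSH detected)"
--     return MESSAGES[best]
-- ===== Notes on version B (the rewrite author's own statement) =====
-- stated objective: alternative
-- what changed: Replaces A's set-building plus branch cascade of intersection tests by a per-port classification: every port is mapped independently to a priority rank via a dict, the verdict is the message of the minimum rank seen (with the SSH rank refined by a web-port check), so no port set and no decision cascade exist in B.
import Mathlib
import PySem

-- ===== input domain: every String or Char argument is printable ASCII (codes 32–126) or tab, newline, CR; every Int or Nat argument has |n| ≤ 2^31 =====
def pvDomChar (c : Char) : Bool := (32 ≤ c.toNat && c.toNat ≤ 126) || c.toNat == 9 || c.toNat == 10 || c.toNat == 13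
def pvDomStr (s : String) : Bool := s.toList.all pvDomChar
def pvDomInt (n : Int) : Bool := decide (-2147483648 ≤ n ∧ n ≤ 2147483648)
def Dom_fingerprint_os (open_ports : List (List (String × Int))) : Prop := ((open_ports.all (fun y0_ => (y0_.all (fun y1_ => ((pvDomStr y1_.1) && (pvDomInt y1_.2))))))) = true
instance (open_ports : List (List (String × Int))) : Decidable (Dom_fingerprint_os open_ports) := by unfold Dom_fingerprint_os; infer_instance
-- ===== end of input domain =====

-- B replaces A's port-set + branch cascade by a per-port priority-rank classification whose
-- minimum rank picks the message; A = B is proved on Pre_ (every record has a "port" key).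

-- ===== PORT A =====
def fingerprint_os (open_ports : List (List (String × Int))) : String :=
  match open_ports.mapM (fun r => (PySem.Dict.mk r).get? "port") with
  | none => ""  -- r["port"] raises KeyError in Python here; excluded by Pre_
  | some vals =>
    let ports : PySem.Set Int := PySem.Set.ofList vals
    if PySem.Set.inter (PySem.Set.ofList [135, 139, 445]) ports ≠ [] then
      "Windows (SMB/MSRPC detected)"
    else if 22 ∈ ports ∧ PySem.Set.inter ports (PySem.Set.ofList [135, 139, 445]) = [] then
      if 80 ∈ ports ∨ 443 ∈ ports then "Linux / Unix (SSH + web stack)"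
      else "Linux / Unix (SSH detected)"
    else if PySem.Set.inter (PySem.Set.ofList [2375]) ports ≠ [] then
      "Linux with Docker daemon exposed"
    else if PySem.Set.inter (PySem.Set.ofList [9200]) ports ≠ [] then
      "Linux / Elasticsearch node"
    else if PySem.Set.inter (PySem.Set.ofList [3306, 5432, 27017]) ports ≠ [] then
      "Database server (Linux likely)"
    else if PySem.Set.inter (PySem.Set.ofList [3389]) ports ≠ [] then
      "Windows (RDP detected)"
    else if ports ≠ [] then "Unknown OS — insufficient port pattern"
    else "No open ports — OS undetermined"

-- ===== PORT B =====
-- module-level RANK dict of Source B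
def fpRankPairs : List (Int × Nat) :=
  [(135, 0), (139, 0), (445, 0), (22, 1), (2375, 2), (9200, 3),
   (3306, 4), (5432, 4), (27017, 4), (3389, 5)]

-- RANK.get(p, 6)
def fpRank (p : Int) : Nat := PySem.Dict.getD (PySem.Dict.mk fpRankPairs) p 6

-- module-level MESSAGES list of Source B ("" at index 1: the SSH rank is refined separately)
def fpMessages : List String :=
  ["Windows (SMB/MSRPC detected)",
   "",
   "Linux with Docker daemon exposed",
   "Linux / Elasticsearch node",
   "Database server (Linux likely)",
   "Windows (RDP detected)",
   "Unknown OS — insufficient port pattern",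
   "No open ports — OS undetermined"]

def fingerprint_os_alt (open_ports : List (List (String × Int))) : String :=
  match open_ports.mapM (fun r => (PySem.Dict.mk r).get? "port") with
  | none => ""  -- KeyError; excluded by Pre_
  | some ports =>
    let best : Nat := PySem.List.minD (ports.map fpRank) (fun x => x) 7
    if best = 1 then
      if ports.any (fun p => p == 80 || p == 443) then "Linux / Unix (SSH + web stack)"
      else "Linux / Unix (SSH detected)"
    else
      match PySem.List.pyGet? fpMessages (best : Int) with
      | some s => s
      | none => ""  -- unreachable: best is always one of 0, 2, 3, 4, 5, 6, 7

-- ===== PRECONDITION & SPEC =====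
-- Pre_ excludes exactly the inputs where some record lacks a "port" key, on which A raises KeyError.
def Pre_fingerprint_os (open_ports : List (List (String × Int))) : Prop :=
  ∀ r ∈ open_ports, "port" ∈ r.map Prod.fst
instance (open_ports : List (List (String × Int))) : Decidable (Pre_fingerprint_os open_ports) := by
  unfold Pre_fingerprint_os; infer_instance

def pvWitness_fingerprint_os : (List (List (String × Int))) := [[("port", 22)], [("port", 443)]]

def Spec_fingerprint_os (open_ports : List (List (String × Int))) (out : String) : Prop := out = fingerprint_os_alt open_ports
instance (open_ports : List (List (String × Int))) (out : String) : Decidable (Spec_fingerprint_os open_ports out) := by unfold Spec_fingerprint_os; infer_instance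

-- ===== CLAIM (what is proved, stated in full; the proofs are below) =====
def Claim_equal_fingerprint_os : Prop := ∀ (open_ports : List (List (String × Int))), Dom_fingerprint_os open_ports → Pre_fingerprint_os open_ports → Spec_fingerprint_os open_ports (fingerprint_os open_ports)

-- ===== LEMMAS AND PROOFS =====

-- the RANK dict lookup, written out as a case split on the port number
lemma fpRank_eq (p : Int) :
    fpRank p =
      if p = 135 ∨ p = 139 ∨ p = 445 then 0
      else if p = 22 then 1
      else if p = 2375 then 2
      else if p = 9200 then 3
      else if p = 3306 ∨ p = 5432 ∨ p = 27017 then 4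
      else if p = 3389 then 5
      else 6 := by
  simp only [fpRank, fpRankPairs, PySem.Dict.getD, PySem.Dict.get?, List.find?,
    show ∀ a b : Int, (a == b) = decide (a = b) from fun _ _ => rfl]
  split_ifs with h1 h2 h3 h4 h5 h6 <;>
    [rcases h1 with rfl | rfl | rfl; subst h2; subst h3; subst h4;
     rcases h5 with rfl | rfl | rfl; subst h6; skip] <;>
    simp_all [eq_comm]

lemma fpRank_le (p : Int) : fpRank p ≤ 6 := by
  rw [fpRank_eq]; split_ifs <;> omega

-- the minimum rank over a list is k when rank k occurs and no smaller rank occurs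
lemma best_eq {vals : List Int} {k : Nat}
    (hex : ∃ p ∈ vals, fpRank p = k) (hlo : ∀ p ∈ vals, k ≤ fpRank p) :
    PySem.List.minD (vals.map fpRank) (fun x => x) 7 = k := by
  rcases hex with ⟨p, hp, hpk⟩
  have hne : vals.map fpRank ≠ [] := by
    intro h; rw [List.map_eq_nil_iff] at h; subst h; exact absurd hp (List.not_mem_nil)
  cases hmin : PySem.List.min? (vals.map fpRank) (fun x => x) with
  | none => exact absurd ((PySem.List.min?_eq_none_iff _ _).1 hmin) hne
  | some m =>
    have hmem := PySem.List.min?_mem hmin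
    rcases List.mem_map.1 hmem with ⟨q, hq, hqm⟩
    have h1 : k ≤ m := hqm ▸ hlo q hq
    have h2 : m ≤ k := by
      have := PySem.List.min?_isMin hmin (fpRank p) (List.mem_map_of_mem hp)
      simpa [hpk] using this
    have : m = k := le_antisymm h2 h1
    simp [PySem.List.minD, hmin, this]

-- a trigger-set intersection is nonempty exactly when some trigger port is in the scanned set
lemma trig_ne (l t : List Int) :
    (PySem.Set.inter (PySem.Set.ofList l) t ≠ []) ↔ ∃ x ∈ l, x ∈ t := by
  constructor
  · intro h
    rcases List.exists_mem_of_ne_nil _ h with ⟨x, hx⟩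
    rcases (PySem.Set.mem_inter _ _ _).1 hx with ⟨hs, ht⟩
    exact ⟨x, (PySem.Set.mem_ofList _ _).1 hs, ht⟩
  · rintro ⟨x, hx, ht⟩ h0
    have hm := (PySem.Set.mem_inter _ _ _).2 ⟨(PySem.Set.mem_ofList _ _).2 hx, ht⟩
    rw [h0] at hm
    simp at hm

-- the flipped orientation (A also writes `ports.intersection(trigger)`)
lemma trig_ne' (t l : List Int) :
    (PySem.Set.inter t (PySem.Set.ofList l) ≠ []) ↔ ∃ x ∈ l, x ∈ t := by
  constructor
  · intro h
    rcases List.exists_mem_of_ne_nil _ h with ⟨x, hx⟩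
    rcases (PySem.Set.mem_inter _ _ _).1 hx with ⟨ht, hs⟩
    exact ⟨x, (PySem.Set.mem_ofList _ _).1 hs, ht⟩
  · rintro ⟨x, hx, ht⟩ h0
    have hm := (PySem.Set.mem_inter _ _ _).2 ⟨ht, (PySem.Set.mem_ofList _ _).2 hx⟩
    rw [h0] at hm
    simp at hm

-- the complementary form A's SSH guard tests (`ports.intersection(smb) == set()`)
lemma trig_eq' (t l : List Int) :
    (PySem.Set.inter t (PySem.Set.ofList l) = []) ↔ ¬ ∃ x ∈ l, x ∈ t := by
  rw [← trig_ne', not_not]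

-- "no smaller rank occurs" rephrased: if none of the ranks below k is hit, every rank is ≥ k
lemma all_ge_of_not_hit {vals : List Int} {k : Nat}
    (h : ∀ j < k, ¬ ∃ p ∈ vals, fpRank p = j) : ∀ p ∈ vals, k ≤ fpRank p := by
  intro p hp
  by_contra hlt
  exact h (fpRank p) (by omega) ⟨p, hp, rfl⟩

lemma fpRank0 (p : Int) : fpRank p = 0 ↔ (p = 135 ∨ p = 139 ∨ p = 445) := by
  rw [fpRank_eq]; split_ifs <;> simp_all

lemma fpRank1 (p : Int) : fpRank p = 1 ↔ p = 22 := by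
  rw [fpRank_eq]; split_ifs <;> simp_all <;> omega

lemma fpRank2 (p : Int) : fpRank p = 2 ↔ p = 2375 := by
  rw [fpRank_eq]; split_ifs <;> simp_all <;> omega

lemma fpRank3 (p : Int) : fpRank p = 3 ↔ p = 9200 := by
  rw [fpRank_eq]; split_ifs <;> simp_all <;> omega

lemma fpRank4 (p : Int) : fpRank p = 4 ↔ (p = 3306 ∨ p = 5432 ∨ p = 27017) := by
  rw [fpRank_eq]; split_ifs <;> simp_all <;> omega

lemma fpRank5 (p : Int) : fpRank p = 5 ↔ p = 3389 := by
  rw [fpRank_eq]; split_ifs <;> simp_all <;> omega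

-- ===== VERDICT (by name: the statement is the Claim_ definition above) =====
theorem fingerprint_os_spec : Claim_equal_fingerprint_os := by
  intro open_ports _ _
  unfold Spec_fingerprint_os fingerprint_os fingerprint_os_alt
  cases h : open_ports.mapM (fun r => (PySem.Dict.mk r).get? "port") with
  | none => rfl
  | some vals =>
    dsimp only
    by_cases h0 : ∃ p ∈ vals, fpRank p = 0
    · have hA : ∃ x ∈ ([135, 139, 445] : List Int), x ∈ PySem.Set.ofList vals := by
        rcases h0 with ⟨p, hp, hr⟩
        rcases (fpRank0 p).1 hr with rfl | rfl | rfl <;>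
          exact ⟨_, by simp, (PySem.Set.mem_ofList _ _).2 hp⟩
      rw [if_pos ((trig_ne _ _).2 hA),
          show PySem.List.minD (vals.map fpRank) (fun x => x) 7 = 0 from
            best_eq h0 (fun p _ => Nat.zero_le _)]
      rfl
    · rw [if_neg (fun hc => h0 (by
        rcases (trig_ne _ _).1 hc with ⟨x, hx, hm⟩
        exact ⟨x, (PySem.Set.mem_ofList _ _).1 hm, (fpRank0 x).2 (by simpa using hx)⟩))]
      have hsmbeq : PySem.Set.inter (PySem.Set.ofList vals) (PySem.Set.ofList [135, 139, 445]) = [] := by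
        rw [trig_eq']
        rintro ⟨x, hx, hm⟩
        exact h0 ⟨x, (PySem.Set.mem_ofList _ _).1 hm, (fpRank0 x).2 (by simpa using hx)⟩
      by_cases h1 : ∃ p ∈ vals, fpRank p = 1
      · have h22v : (22 : Int) ∈ vals := by
          rcases h1 with ⟨p, hp, hr⟩; rcases (fpRank1 p).1 hr; exact hp
        rw [if_pos (⟨(PySem.Set.mem_ofList _ _).2 h22v, hsmbeq⟩ :
              (22 : Int) ∈ PySem.Set.ofList vals ∧
              PySem.Set.inter (PySem.Set.ofList vals) (PySem.Set.ofList [135, 139, 445]) = []),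
            show PySem.List.minD (vals.map fpRank) (fun x => x) 7 = 1 from
              best_eq h1 (all_ge_of_not_hit (by
                intro j hj; interval_cases j; exact h0))]
        by_cases hweb : ∃ p ∈ vals, p = 80 ∨ p = 443
        · have hwA : (80 : Int) ∈ PySem.Set.ofList vals ∨ (443 : Int) ∈ PySem.Set.ofList vals := by
            rcases hweb with ⟨p, hp, rfl | rfl⟩
            · exact Or.inl ((PySem.Set.mem_ofList _ _).2 hp)
            · exact Or.inr ((PySem.Set.mem_ofList _ _).2 hp)
          have hwB : vals.any (fun p => p == 80 || p == 443) = true := by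
            rcases hweb with ⟨p, hp, hd⟩
            exact List.any_eq_true.2 ⟨p, hp, by rcases hd with rfl | rfl <;> simp⟩
          rw [if_pos hwA]
          simp [hwB]
        · have hwA : ¬((80 : Int) ∈ PySem.Set.ofList vals ∨ (443 : Int) ∈ PySem.Set.ofList vals) := by
            rintro (hm | hm)
            · exact hweb ⟨80, (PySem.Set.mem_ofList _ _).1 hm, Or.inl rfl⟩
            · exact hweb ⟨443, (PySem.Set.mem_ofList _ _).1 hm, Or.inr rfl⟩
          have hwB : vals.any (fun p => p == 80 || p == 443) = false := by
            rw [List.any_eq_false]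
            intro p hp hc
            simp only [Bool.or_eq_true, beq_iff_eq] at hc
            exact hweb ⟨p, hp, hc⟩
          rw [if_neg hwA]
          simp [hwB]
      · rw [if_neg (fun hc => h1 ⟨22, (PySem.Set.mem_ofList _ _).1 hc.1, (fpRank1 22).2 rfl⟩)]
        by_cases h2 : ∃ p ∈ vals, fpRank p = 2
        · have hA : ∃ x ∈ ([2375] : List Int), x ∈ PySem.Set.ofList vals := by
            rcases h2 with ⟨p, hp, hr⟩
            rcases (fpRank2 p).1 hr; exact ⟨_, by simp, (PySem.Set.mem_ofList _ _).2 hp⟩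
          rw [if_pos ((trig_ne _ _).2 hA),
              show PySem.List.minD (vals.map fpRank) (fun x => x) 7 = 2 from
                best_eq h2 (all_ge_of_not_hit (by
                  intro j hj; interval_cases j; exacts [h0, h1]))]
          rfl
        · rw [if_neg (fun hc => h2 (by
            rcases (trig_ne _ _).1 hc with ⟨x, hx, hm⟩
            exact ⟨x, (PySem.Set.mem_ofList _ _).1 hm, (fpRank2 x).2 (by simpa using hx)⟩))]
          by_cases h3 : ∃ p ∈ vals, fpRank p = 3
          · have hA : ∃ x ∈ ([9200] : List Int), x ∈ PySem.Set.ofList vals := by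
              rcases h3 with ⟨p, hp, hr⟩
              rcases (fpRank3 p).1 hr; exact ⟨_, by simp, (PySem.Set.mem_ofList _ _).2 hp⟩
            rw [if_pos ((trig_ne _ _).2 hA),
                show PySem.List.minD (vals.map fpRank) (fun x => x) 7 = 3 from
                  best_eq h3 (all_ge_of_not_hit (by
                    intro j hj; interval_cases j; exacts [h0, h1, h2]))]
            rfl
          · rw [if_neg (fun hc => h3 (by
              rcases (trig_ne _ _).1 hc with ⟨x, hx, hm⟩
              exact ⟨x, (PySem.Set.mem_ofList _ _).1 hm, (fpRank3 x).2 (by simpa using hx)⟩))]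
            by_cases h4 : ∃ p ∈ vals, fpRank p = 4
            · have hA : ∃ x ∈ ([3306, 5432, 27017] : List Int), x ∈ PySem.Set.ofList vals := by
                rcases h4 with ⟨p, hp, hr⟩
                rcases (fpRank4 p).1 hr with rfl | rfl | rfl <;>
                  exact ⟨_, by simp, (PySem.Set.mem_ofList _ _).2 hp⟩
              rw [if_pos ((trig_ne _ _).2 hA),
                  show PySem.List.minD (vals.map fpRank) (fun x => x) 7 = 4 from
                    best_eq h4 (all_ge_of_not_hit (by
                      intro j hj; interval_cases j; exacts [h0, h1, h2, h3]))]
              rfl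
            · rw [if_neg (fun hc => h4 (by
                rcases (trig_ne _ _).1 hc with ⟨x, hx, hm⟩
                exact ⟨x, (PySem.Set.mem_ofList _ _).1 hm, (fpRank4 x).2 (by simpa using hx)⟩))]
              by_cases h5 : ∃ p ∈ vals, fpRank p = 5
              · have hA : ∃ x ∈ ([3389] : List Int), x ∈ PySem.Set.ofList vals := by
                  rcases h5 with ⟨p, hp, hr⟩
                  rcases (fpRank5 p).1 hr; exact ⟨_, by simp, (PySem.Set.mem_ofList _ _).2 hp⟩
                rw [if_pos ((trig_ne _ _).2 hA),
                    show PySem.List.minD (vals.map fpRank) (fun x => x) 7 = 5 from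
                      best_eq h5 (all_ge_of_not_hit (by
                        intro j hj; interval_cases j; exacts [h0, h1, h2, h3, h4]))]
                rfl
              · rw [if_neg (fun hc => h5 (by
                  rcases (trig_ne _ _).1 hc with ⟨x, hx, hm⟩
                  exact ⟨x, (PySem.Set.mem_ofList _ _).1 hm, (fpRank5 x).2 (by simpa using hx)⟩))]
                cases vals with
                | nil => rfl
                | cons v t =>
                  have hne : PySem.Set.ofList (v :: t) ≠ [] := by
                    intro hc
                    have : v ∈ PySem.Set.ofList (v :: t) := (PySem.Set.mem_ofList _ _).2 (by simp)
                    rw [hc] at this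
                    simp at this
                  have h6 : ∃ p ∈ (v :: t), fpRank p = 6 := by
                    refine ⟨v, by simp, ?_⟩
                    have hge : ∀ p ∈ (v :: t), 6 ≤ fpRank p :=
                      all_ge_of_not_hit (by
                        intro j hj; interval_cases j; exacts [h0, h1, h2, h3, h4, h5])
                    exact le_antisymm (fpRank_le v) (hge v (by simp))
                  rw [if_pos hne,
                      show PySem.List.minD ((v :: t).map fpRank) (fun x => x) 7 = 6 from
                        best_eq h6 (all_ge_of_not_hit (by
                          intro j hj; interval_cases j; exacts [h0, h1, h2, h3, h4, h5]))]
                  rfl
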